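-- pv_equiv track=rewrite | github.com/SCP-KAKA/ChineseNRE | data/data_util.py | X_padding
-- ===== SOURCE A (Python) =====
-- word2id = {"unknown": 0, "blank": 1}    # word2id的字典
--
-- max_len = 50    # 字向量的长度
--
-- def X_padding(words):
--     """
--         把句子（words）转为 id 形式，不足 max_len 自动补全长度，超出的截断。
--         :param 句子
--         :return max_len长度的字向量
--     """
--     ids = []
--     for i in words:
--         if i in word2id:
--             ids.append(word2id[i])
--         else:
--             ids.append(word2id["unknown"])
--     if len(ids) >= max_len:
--         return ids[:max_len]
--     ids.extend([word2id["blank"]] * (max_len - len(ids)))  # ids和长度为 max_len-len(idx) 的 BLACK的id的数组合并，补全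
--
--     return ids
-- ===== SOURCE B (Python) =====
-- word2id = {"unknown": 0, "blank": 1}    # word2id的字典
--
-- max_len = 50    # 字向量的长度
--
-- def X_padding(words):
--     # Recursive cell-by-cell construction: recurse on remaining slot count n,
--     # consuming one word per slot; padding emerges from the base case, so
--     # there is no truncate/pad stage and no length conditional at all.
--     def go(ws, n):
--         if n == 0:
--             return []
--         if not ws:
--             return [word2id["blank"]] * n
--         return [word2id.get(ws[0], word2id["unknown"])] + go(ws[1:], n - 1)
--     return go(words, max_len)
-- ===== Notes on version B (the rewrite author's own statement) =====
-- stated objective: alternative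
-- what changed: B builds the vector by structural recursion on the remaining slot count (one word consumed per slot, padding produced by the empty-words base case), eliminating A's append loop over all words, the length conditional and the slice/extend pad stage.
import Mathlib
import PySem

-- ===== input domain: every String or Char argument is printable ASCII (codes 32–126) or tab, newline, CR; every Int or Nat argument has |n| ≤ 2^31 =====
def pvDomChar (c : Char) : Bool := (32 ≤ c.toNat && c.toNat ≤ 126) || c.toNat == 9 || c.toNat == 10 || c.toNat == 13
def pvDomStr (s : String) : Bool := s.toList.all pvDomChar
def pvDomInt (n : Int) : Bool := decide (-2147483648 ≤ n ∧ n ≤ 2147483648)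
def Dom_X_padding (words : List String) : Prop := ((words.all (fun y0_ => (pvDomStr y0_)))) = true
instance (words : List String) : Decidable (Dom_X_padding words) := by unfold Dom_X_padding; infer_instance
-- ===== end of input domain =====

-- B builds the vector by structural recursion on the remaining slot count, with padding
-- produced by the empty-words base case: no length conditional, no slice/extend pad stage.

-- ===== PORT A =====
def pyWord2id : PySem.Dict String Int :=
  (PySem.Dict.empty.insert "unknown" 0).insert "blank" 1

def X_padding (words : List String) : List Int :=
  let ids := words.foldl (fun ids i =>
    if (pyWord2id.get? i).isSome then ids ++ [pyWord2id.getD i 0]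
    else ids ++ [pyWord2id.getD "unknown" 0]) []
  if ids.length ≥ 50 then PySem.List.slice ids none (some 50)
  else ids ++ List.replicate (50 - ids.length) (pyWord2id.getD "blank" 0)

-- ===== PORT B =====
-- literal transliteration of Source B's inner 'go' (recursion on slot count n, then on ws)
def XPgo : List String → Nat → List Int
  | _, 0 => []
  | [], Nat.succ n => List.replicate (Nat.succ n) (pyWord2id.getD "blank" 0)
  | w :: ws, Nat.succ n =>
      [pyWord2id.getD w (pyWord2id.getD "unknown" 0)] ++ XPgo ws n

def X_padding_alt (words : List String) : List Int := XPgo words 50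

-- ===== PRECONDITION & SPEC =====
def Spec_X_padding (words : List String) (out : List Int) : Prop := out = X_padding_alt words
instance (words : List String) (out : List Int) : Decidable (Spec_X_padding words out) := by unfold Spec_X_padding; infer_instance

-- ===== CLAIM (what is proved, stated in full; the proofs are below) =====
def Claim_equal_X_padding : Prop := ∀ (words : List String), Dom_X_padding words → Spec_X_padding words (X_padding words)

-- ===== LEMMAS AND PROOFS =====

lemma w2id_unknown : pyWord2id.getD "unknown" 0 = 0 := by decide
lemma w2id_blank : pyWord2id.getD "blank" 0 = 1 := by decide

lemma slice50 {A : Type} (xs : List A) : PySem.List.slice xs none (some 50) = xs.take 50 := by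
  rw [PySem.List.slice_to xs (by norm_num : (0:Int) ≤ 50)]
  rfl

-- the element A appends is getD w 0 in both branches
lemma pyA_elem (w : String) :
    (if (pyWord2id.get? w).isSome then pyWord2id.getD w 0
     else pyWord2id.getD "unknown" 0) = pyWord2id.getD w 0 := by
  cases hg : pyWord2id.get? w with
  | none => simp [hg, PySem.Dict.getD_of_get?_eq_none _ _ hg, w2id_unknown]
  | some v => simp [hg]

-- A's loop is a map over the words
lemma pyA_fold (words : List String) (acc : List Int) :
    words.foldl (fun ids i =>
      if (pyWord2id.get? i).isSome then ids ++ [pyWord2id.getD i 0]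
      else ids ++ [pyWord2id.getD "unknown" 0]) acc
    = acc ++ words.map (fun w => pyWord2id.getD w 0) := by
  induction words generalizing acc with
  | nil => simp
  | cons w ws ih =>
    simp only [List.foldl_cons, List.map_cons]
    rw [show (if (pyWord2id.get? w).isSome then acc ++ [pyWord2id.getD w 0]
        else acc ++ [pyWord2id.getD "unknown" 0]) = acc ++ [pyWord2id.getD w 0] by
      by_cases h : (pyWord2id.get? w).isSome <;> simp only [h, if_pos, if_neg] <;>
        simp [← pyA_elem w, h]]
    rw [ih]; simp

-- characterisation of B's recursion
lemma XPgo_eq (n : Nat) : ∀ (ws : List String),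
    XPgo ws n = (ws.take n).map (fun w => pyWord2id.getD w 0)
                ++ List.replicate (n - ws.length) (1 : Int) := by
  induction n with
  | zero => intro ws; simp [XPgo]
  | succ n ih =>
    intro ws
    cases ws with
    | nil => simp [XPgo, w2id_blank]
    | cons w ws =>
      simp only [XPgo, w2id_unknown, ih ws, List.take_succ_cons, List.map_cons,
        List.length_cons, List.cons_append, List.nil_append, Nat.succ_sub_succ]

-- ===== VERDICT (by name: the statement is the Claim_ definition above) =====
theorem X_padding_spec : Claim_equal_X_padding := by
  intro words _
  unfold Spec_X_padding X_padding X_padding_alt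
  rw [pyA_fold, XPgo_eq]
  simp only [List.nil_append, w2id_blank, List.length_map]
  by_cases hge : words.length ≥ 50
  · rw [if_pos hge, slice50, ← List.map_take]
    have : 50 - words.length = 0 := by omega
    simp [this]
  · rw [if_neg hge]
    have hlt : words.length < 50 := by omega
    rw [List.take_of_length_le (Nat.le_of_lt hlt)]
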